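-- pv_equiv track=rewrite | github.com/cspickert/advent-of-code-2024 | day07.py | find_solution_helper
-- ===== SOURCE A (Python) =====
-- def find_solution_helper(ops, result, accum, args):
--     if accum == result:
--         return True
--     if accum > result or not args:
--         return False
--     for op in ops:
--         match op:
--             case "+":
--                 next_accum = accum + args[0]
--             case "*":
--                 next_accum = accum * args[0]
--             case "||":
--                 next_accum = int(str(accum) + str(args[0]))
--         if find_solution_helper(ops, result, next_accum, args[1:]):
--             return True
--     return False
-- ===== SOURCE B (Python) =====
-- # B: level-by-level (breadth-first) frontier search instead of A's depth-first recursion;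
-- # same guard rule (accept accum==result, expand only when accum < result); raises ValueError on an unknown op.
-- def find_solution_helper(ops, result, accum, args):
--     frontier = [accum]
--     for v in args:
--         if result in frontier:
--             return True
--         next_frontier = []
--         for a in frontier:
--             if a < result:
--                 for op in ops:
--                     if op == "+":
--                         next_frontier.append(a + v)
--                     elif op == "*":
--                         next_frontier.append(a * v)
--                     elif op == "||":
--                         next_frontier.append(int(str(a) + str(v)))
--                     else:
--                         raise ValueError(op)
--         frontier = next_frontier
--     return result in frontier
-- ===== Notes on version B (the rewrite author's own statement) =====
-- stated objective: alternative
-- what changed: A's depth-first recursion with early return per operator is replaced by an iterative level-by-level frontier search over the args, keeping the same accept (accum==result) and prune (accum>result) rule.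
-- outside the precondition, e.g. on find_solution_helper(['+', '?'], 10, 1, [2, 3]): A returns False, B raises ValueError; on find_solution_helper(['+', '||'], 3, 1, [2, -1]): A returns True, B returns True
import Mathlib
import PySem

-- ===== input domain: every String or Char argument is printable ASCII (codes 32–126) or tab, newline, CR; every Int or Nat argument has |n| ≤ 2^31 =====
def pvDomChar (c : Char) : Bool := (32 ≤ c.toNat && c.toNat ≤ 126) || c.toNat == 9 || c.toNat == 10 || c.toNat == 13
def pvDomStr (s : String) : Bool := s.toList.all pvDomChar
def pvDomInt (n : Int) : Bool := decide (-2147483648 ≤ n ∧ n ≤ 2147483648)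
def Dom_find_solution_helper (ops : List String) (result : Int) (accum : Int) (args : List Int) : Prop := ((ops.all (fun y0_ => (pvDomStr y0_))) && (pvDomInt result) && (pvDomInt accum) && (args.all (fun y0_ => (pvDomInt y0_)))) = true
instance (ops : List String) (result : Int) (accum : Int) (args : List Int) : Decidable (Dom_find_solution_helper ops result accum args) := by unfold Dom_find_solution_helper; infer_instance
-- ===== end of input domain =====

-- B replaces A's depth-first recursion by an iterative level-by-level frontier search (same
-- accept/prune rule); objective: alternative decomposition, no speed claim.

-- ===== PORT A =====
-- int(str(a) + str(v)); PySem.Int.ofChars?/toChars are exact; getD 0 is unreachable inside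
-- Pre_ (Python raises ValueError exactly where ofChars? is none, and Pre_ excludes that).
def pyConcatInt (a v : Int) : Int :=
  (PySem.Int.ofChars? (PySem.Int.toChars a ++ PySem.Int.toChars v)).getD 0

mutual
-- literal transliteration of A; the for-loop is fshLoopA, carrying Python's possibly-unbound
-- next_accum as `Option Int` (none at the recursive call = UnboundLocalError, outside Pre_).
def find_solution_helper (ops : List String) (result : Int) (accum : Int) (args : List Int) : Bool :=
  if accum = result then true
  else if result < accum ∨ args.isEmpty then false
  else
    match args with
    | [] => false   -- unreachable: args.isEmpty was false
    | a :: tl => fshLoopA ops ops result accum a tl none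
termination_by (2 * args.length, 0)

-- A's `for op in ops` loop over the remaining operators; `a :: tl` is the (nonempty) args list,
-- st is Python's next_accum variable (none = not yet bound).
def fshLoopA (ops opsLeft : List String) (result : Int) (accum : Int) (a : Int) (tl : List Int) (st : Option Int) : Bool :=
  match opsLeft with
  | [] => false
  | op :: rest =>
    let st' : Option Int :=
      if op = "+" then some (accum + a)
      else if op = "*" then some (accum * a)
      else if op = "||" then some (pyConcatInt accum a)
      else st
    match st' with
    | none => false   -- Python raises UnboundLocalError here; excluded by Pre_
    | some n =>
      if find_solution_helper ops result n tl then true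
      else fshLoopA ops rest result accum a tl st'
termination_by (2 * tl.length + 1, opsLeft.length)
end

-- ===== PORT B =====
def fshApplyB (op : String) (a v : Int) : Int :=
  if op = "+" then a + v
  else if op = "*" then a * v
  else if op = "||" then pyConcatInt a v
  else 0   -- Python B raises ValueError here; excluded by Pre_

def fshLoopB (ops : List String) (result : Int) (frontier : List Int) (args : List Int) : Bool :=
  match args with
  | [] => frontier.contains result
  | v :: rest =>
    if frontier.contains result then true
    else fshLoopB ops result
      (frontier.flatMap (fun a => if a < result then ops.map (fun op => fshApplyB op a v) else []))
      rest

def find_solution_helper_alt (ops : List String) (result : Int) (accum : Int) (args : List Int) : Bool :=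
  fshLoopB ops result [accum] args

-- ===== PRECONDITION & SPEC =====
-- Unless the run is trivially safe (result ≤ accum, or no args: then no operator is ever
-- evaluated), Pre_ excludes (a) lists containing an op other than "+","*","||" — Python A raises
-- UnboundLocalError when such an op comes first, and where a stale next_accum lets A return a
-- value that return is an accident of leftover loop state and B raises ValueError there — and
-- (b) "||" together with a negative argument, where Python's int(str(a)+str(v)) raises
-- ValueError whenever the concatenation is reached.
def Pre_find_solution_helper (ops : List String) (result : Int) (accum : Int) (args : List Int) : Prop :=
  (result ≤ accum ∨ args = []) ∨
  ((∀ op ∈ ops, op = "+" ∨ op = "*" ∨ op = "||") ∧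
   ((("||" : String) ∈ ops) → ∀ a ∈ args, 0 ≤ a))
instance (ops : List String) (result : Int) (accum : Int) (args : List Int) : Decidable (Pre_find_solution_helper ops result accum args) := by unfold Pre_find_solution_helper; infer_instance

def pvWitness_find_solution_helper : List String × Int × Int × List Int := (["+", "*"], 10, 1, [2, 3])

def Spec_find_solution_helper (ops : List String) (result : Int) (accum : Int) (args : List Int) (out : Bool) : Prop := out = find_solution_helper_alt ops result accum args
instance (ops : List String) (result : Int) (accum : Int) (args : List Int) (out : Bool) : Decidable (Spec_find_solution_helper ops result accum args out) := by unfold Spec_find_solution_helper; infer_instance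

-- ===== CLAIM (what is proved, stated in full; the proofs are below) =====
def Claim_equal_find_solution_helper : Prop := ∀ (ops : List String) (result : Int) (accum : Int) (args : List Int), Dom_find_solution_helper ops result accum args → Pre_find_solution_helper ops result accum args → Spec_find_solution_helper ops result accum args (find_solution_helper ops result accum args)

-- ===== LEMMAS AND PROOFS =====

-- Under good ops, A's inner loop is an `any` over the operators applied via fshApplyB.
lemma loopA_good (ops opsLeft : List String) (result accum a : Int) (tl : List Int)
    (st : Option Int) (h : ∀ op ∈ opsLeft, op = "+" ∨ op = "*" ∨ op = "||") :
    fshLoopA ops opsLeft result accum a tl st =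
      opsLeft.any (fun op => find_solution_helper ops result (fshApplyB op accum a) tl) := by
  induction opsLeft generalizing st with
  | nil => rw [fshLoopA.eq_def]; simp
  | cons op rest ih =>
    have hrest : ∀ o ∈ rest, o = "+" ∨ o = "*" ∨ o = "||" := fun o ho => h o (by simp [ho])
    rw [fshLoopA.eq_def]
    rcases h op (by simp) with h1 | h1 | h1 <;> subst h1 <;>
      by_cases hf : find_solution_helper ops result (fshApplyB "+" accum a) tl = true <;>
      by_cases hg : find_solution_helper ops result (fshApplyB "*" accum a) tl = true <;>
      by_cases hk : find_solution_helper ops result (fshApplyB "||" accum a) tl = true <;>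
      simp_all [fshApplyB]

-- A's top-level step on a nonempty argument list, for accum ≠ result.
lemma fsh_cons (ops : List String) (result accum v : Int) (rest : List Int)
    (h : ∀ op ∈ ops, op = "+" ∨ op = "*" ∨ op = "||") (hne : accum ≠ result) :
    find_solution_helper ops result accum (v :: rest) =
      if accum < result then
        ops.any (fun op => find_solution_helper ops result (fshApplyB op accum v) rest)
      else false := by
  rw [find_solution_helper.eq_def]
  by_cases hlt : accum < result
  · have : ¬ result < accum := by omega
    simp [hne, this, hlt, loopA_good ops ops result accum v rest none h]
  · have : result < accum := by omega
    simp [hne, this, hlt]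

-- A's base case.
lemma fsh_nil (ops : List String) (result accum : Int) :
    find_solution_helper ops result accum [] = decide (accum = result) := by
  rw [find_solution_helper.eq_def]
  by_cases hA : accum = result <;> simp [hA]

-- B's frontier loop computes `any` of A's recursion over the frontier.
lemma loopB_eq_any (ops : List String) (result : Int) (args : List Int)
    (h : ∀ op ∈ ops, op = "+" ∨ op = "*" ∨ op = "||") :
    ∀ frontier : List Int,
      fshLoopB ops result frontier args =
        frontier.any (fun a => find_solution_helper ops result a args) := by
  induction args with
  | nil =>
    intro frontier
    rw [Bool.eq_iff_iff]
    simp only [fshLoopB, fsh_nil, List.any_eq_true, List.contains_iff_mem, decide_eq_true_eq]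
    exact ⟨fun hm => ⟨result, hm, rfl⟩, fun ⟨x, hx, e⟩ => e ▸ hx⟩
  | cons v rest ih =>
    intro frontier
    rw [fshLoopB]
    by_cases hc : frontier.contains result
    · have hm : result ∈ frontier := by simpa using hc
      have : find_solution_helper ops result result (v :: rest) = true := by
        rw [find_solution_helper.eq_def]; simp
      simp only [hc, if_true]
      rw [Bool.eq_iff_iff]
      simp only [List.any_eq_true, true_iff]
      exact ⟨result, hm, this⟩
    · have hne : ∀ a ∈ frontier, a ≠ result := by
        intro a ha heq
        exact hc (by simp [heq ▸ ha])
      have hcb : frontier.contains result = false := by simpa using hc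
      simp only [hcb, Bool.false_eq_true, if_false, ih]
      rw [Bool.eq_iff_iff]
      simp only [List.any_eq_true, List.mem_flatMap]
      constructor
      · rintro ⟨x, ⟨a, ha, hx⟩, hfsh⟩
        refine ⟨a, ha, ?_⟩
        rw [fsh_cons ops result a v rest h (hne a ha)]
        by_cases hlt : a < result
        · simp only [hlt] at hx ⊢
          simp only [if_true, List.mem_map] at hx
          rcases hx with ⟨op, hop, rfl⟩
          exact List.any_eq_true.mpr ⟨op, hop, hfsh⟩
        · simp [hlt] at hx
      · rintro ⟨a, ha, hfsh⟩
        rw [fsh_cons ops result a v rest h (hne a ha)] at hfsh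
        by_cases hlt : a < result
        · simp only [hlt, if_true, List.any_eq_true] at hfsh
          rcases hfsh with ⟨op, hop, hfsh⟩
          exact ⟨fshApplyB op a v, ⟨a, ha, by simp [hlt, List.mem_map]; exact ⟨op, hop, rfl⟩⟩, hfsh⟩
        · simp [hlt] at hfsh

-- B's loop on an empty frontier never finds anything.
lemma loopB_empty (ops : List String) (result : Int) (args : List Int) :
    fshLoopB ops result [] args = false := by
  induction args with
  | nil => simp [fshLoopB]
  | cons v rest ih => simpa [fshLoopB] using ih

-- ===== VERDICT (by name: the statement is the Claim_ definition above) =====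
theorem find_solution_helper_spec : Claim_equal_find_solution_helper := by
  intro ops result accum args _ hpre
  unfold Spec_find_solution_helper find_solution_helper_alt
  rcases hpre with heasy | hgood
  · -- trivially safe runs: no operator is ever evaluated by either program
    by_cases hacc : accum = result
    · subst hacc
      rw [find_solution_helper.eq_def]
      cases args <;> simp [fshLoopB]
    · rcases heasy with hle | hnil
      · have hlt : result < accum := by omega
        rw [find_solution_helper.eq_def]
        cases args with
        | nil => simp [fshLoopB, hacc, Ne.symm hacc]
        | cons v rest => simp [fshLoopB, hacc, Ne.symm hacc, hlt, not_lt.mpr hle, loopB_empty]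
      · subst hnil
        simp [fsh_nil, fshLoopB, hacc, Ne.symm hacc]
  · rw [loopB_eq_any ops result args hgood.1]
    simp
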